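-- pv_equiv track=rewrite | github.com/ianozsvald/twitter_networkx_concept_map | make_ngrams.py | get_capitalised_word_sequences
-- ===== SOURCE A (Python) =====
-- import string
--
-- def stopword(word):
--     return word in set(["I"])
--
-- def get_capitalised_word_sequences(sentences):
--     """Build lists of capitalised word sequences"""
--     result = []
--     for sentence in sentences:
--         seq = []
--         for word in sentence.split():
--             if word[0] in string.ascii_uppercase:
--                 if not stopword(word):
--                     seq.append(word)
--             else:
--                 if len(seq):
--                     result.append(seq)
--                 seq = []
--         if len(seq):
--             result.append(seq)
--     return result
-- ===== SOURCE B (Python) =====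
-- import string
-- from itertools import groupby
--
-- def stopword(word):
--     return word in set(["I"])
--
-- def get_capitalised_word_sequences(sentences):
--     """Build lists of capitalised word sequences"""
--     result = []
--     for sentence in sentences:
--         for is_cap, run in groupby(sentence.split(),
--                                    key=lambda w: w[0] in string.ascii_uppercase):
--             if is_cap:
--                 seq = [w for w in run if not stopword(w)]
--                 if seq:
--                     result.append(seq)
--     return result
-- ===== Notes on version B (the rewrite author's own statement) =====
-- stated objective: idiomatic
-- what changed: Replaces the stateful append/flush accumulator (pending seq mutated and flushed at run breaks and sentence end) by itertools.groupby: partition each sentence's words into consecutive capitalised/non-capitalised runs, then filter stopwords inside each capitalised run and emit it if non-empty.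
import Mathlib
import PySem

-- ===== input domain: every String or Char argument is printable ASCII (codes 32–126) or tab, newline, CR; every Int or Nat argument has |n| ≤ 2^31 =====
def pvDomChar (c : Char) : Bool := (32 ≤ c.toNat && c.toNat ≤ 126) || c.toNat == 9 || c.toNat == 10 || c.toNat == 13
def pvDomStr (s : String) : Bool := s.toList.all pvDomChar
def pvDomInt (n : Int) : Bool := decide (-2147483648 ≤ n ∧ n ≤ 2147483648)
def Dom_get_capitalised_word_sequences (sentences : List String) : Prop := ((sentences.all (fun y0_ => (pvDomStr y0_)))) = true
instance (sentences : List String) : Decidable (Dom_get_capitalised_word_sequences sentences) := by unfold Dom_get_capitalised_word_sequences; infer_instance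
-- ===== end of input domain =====

-- B replaces A's stateful append/flush accumulator by a group-into-runs-then-filter
-- decomposition (itertools.groupby); same cost, more idiomatic.

-- `word[0] in string.ascii_uppercase`: word is a word from split() so nonempty; for a
-- single ASCII char this is exactly 'A' ≤ c ≤ 'Z' (exact on the stated ASCII domain).
def pvCapFirst (word : String) : Bool :=
  match PySem.Str.pyGet? word 0 with
  | some c => decide ('A' ≤ c ∧ c ≤ 'Z')
  | none => false

-- `word in set(["I"])`
def pvStopword (word : String) : Bool := (PySem.Set.ofList ["I"]).contains word

-- ===== PORT A =====
def get_capitalised_word_sequences (sentences : List String) : List (List String) :=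
  sentences.foldl (fun result sentence =>
    let st := (PySem.Str.split₀ sentence).foldl
      (fun (st : List String × List (List String)) word =>
        if pvCapFirst word then
          if !(pvStopword word) then (st.1 ++ [word], st.2) else st
        else
          (([] : List String), if st.1.length ≠ 0 then st.2 ++ [st.1] else st.2))
      (([] : List String), result)
    if st.1.length ≠ 0 then st.2 ++ [st.1] else st.2) []

-- ===== PORT B =====
-- itertools.groupby(ws, key=pvCapFirst): consecutive runs with their key value.
def pvGroupRuns : List String → List (Bool × List String)
  | [] => []
  | w :: ws =>
    match pvGroupRuns ws with
    | [] => [(pvCapFirst w, [w])]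
    | (k, run) :: rest =>
      if pvCapFirst w = k then (k, w :: run) :: rest
      else (pvCapFirst w, [w]) :: (k, run) :: rest

def get_capitalised_word_sequences_alt (sentences : List String) : List (List String) :=
  sentences.foldl (fun result sentence =>
    (pvGroupRuns (PySem.Str.split₀ sentence)).foldl (fun result kr =>
      if kr.1 then
        let seq := kr.2.filter (fun w => !(pvStopword w))
        if seq.isEmpty then result else result ++ [seq]
      else result) result) []

-- ===== PRECONDITION & SPEC =====
def Spec_get_capitalised_word_sequences (sentences : List String) (out : List (List String)) : Prop := out = get_capitalised_word_sequences_alt sentences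
instance (sentences : List String) (out : List (List String)) : Decidable (Spec_get_capitalised_word_sequences sentences out) := by unfold Spec_get_capitalised_word_sequences; infer_instance

-- ===== CLAIM (what is proved, stated in full; the proofs are below) =====
def Claim_equal_get_capitalised_word_sequences : Prop := ∀ (sentences : List String), Dom_get_capitalised_word_sequences sentences → Spec_get_capitalised_word_sequences sentences (get_capitalised_word_sequences sentences)

-- ===== LEMMAS AND PROOFS =====

-- what B emits for one run
def pvEmitRun (kr : Bool × List String) : List (List String) :=
  if kr.1 then
    let seq := kr.2.filter (fun w => !(pvStopword w))
    if seq.isEmpty then [] else [seq]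
  else []

-- what B emits for a run list
def pvEmit (runs : List (Bool × List String)) : List (List String) := runs.flatMap pvEmitRun

-- A's per-sentence loop, functionally (output only; the pending seq folded in)
def pvALoop : List String → List String → List (List String)
  | [], seq => if seq.length ≠ 0 then [seq] else []
  | w :: ws, seq =>
    if pvCapFirst w then
      pvALoop ws (if !(pvStopword w) then seq ++ [w] else seq)
    else
      (if seq.length ≠ 0 then [seq] else []) ++ pvALoop ws []

-- B's emission with a pending (already filtered) seq merged into a leading capitalised run
def pvEmitPend (seq : List String) (runs : List (Bool × List String)) : List (List String) :=
  match runs with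
  | (true, run) :: rest =>
    (let s := seq ++ run.filter (fun w => !(pvStopword w));
     if s.isEmpty then [] else [s]) ++ pvEmit rest
  | _ => (if seq.length ≠ 0 then [seq] else []) ++ pvEmit runs

theorem pvALoop_foldl (ws : List String) : ∀ (seq : List String) (res : List (List String)),
    (let st := ws.foldl
      (fun (st : List String × List (List String)) word =>
        if pvCapFirst word then
          if !(pvStopword word) then (st.1 ++ [word], st.2) else st
        else
          (([] : List String), if st.1.length ≠ 0 then st.2 ++ [st.1] else st.2))
      (seq, res)
     if st.1.length ≠ 0 then st.2 ++ [st.1] else st.2) = res ++ pvALoop ws seq := by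
  induction ws with
  | nil =>
    intro seq res
    simp only [List.foldl_nil, pvALoop]
    split <;> simp
  | cons w ws ih =>
    intro seq res
    rw [List.foldl_cons]
    by_cases hc : pvCapFirst w
    · by_cases hs : pvStopword w
      · simp only [hc, hs, Bool.not_true, Bool.false_eq_true, if_false, if_true, pvALoop]
        exact ih seq res
      · rw [Bool.not_eq_true] at hs
        simp only [hc, hs, Bool.not_false, if_true, pvALoop]
        exact ih (seq ++ [w]) res
    · rw [Bool.not_eq_true] at hc
      simp only [hc, Bool.false_eq_true, if_false, pvALoop]
      rw [ih]
      split <;> simp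

theorem pvALoop_emitPend (ws : List String) : ∀ (seq : List String),
    pvALoop ws seq = pvEmitPend seq (pvGroupRuns ws) := by
  induction ws with
  | nil => intro seq; simp [pvALoop, pvEmitPend, pvEmit, pvGroupRuns]
  | cons w ws ih =>
    intro seq
    simp only [pvALoop, pvGroupRuns]
    by_cases hc : pvCapFirst w
    · simp only [hc, if_true]
      rcases hg : pvGroupRuns ws with _ | ⟨⟨k, run⟩, rest⟩
      · rw [ih, hg]
        by_cases hs : pvStopword w <;>
          simp [hs, pvEmitPend, pvEmit, List.filter, List.isEmpty_iff]
      · rw [ih, hg]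
        by_cases hk : (pvCapFirst w = k)
        · cases k with
          | true =>
            by_cases hs : pvStopword w <;>
              simp [hs, pvEmitPend, List.filter, List.isEmpty_iff]
          | false => exact absurd (hk ▸ hc) (by simp)
        · -- run break: k must be false since pvCapFirst w = true
          have hkf : k = false := by
            cases k with
            | true => exact absurd (by rw [hc]) hk
            | false => rfl
          subst hkf
          simp only [hc] at hk ⊢
          simp only [if_neg hk]
          by_cases hs : pvStopword w <;>
            simp [hs, pvEmitPend, pvEmit, pvEmitRun, List.filter, List.isEmpty_iff,
              List.length_eq_zero_iff]
    · simp only [hc, if_false, Bool.false_eq_true]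
      rcases hg : pvGroupRuns ws with _ | ⟨⟨k, run⟩, rest⟩
      · rw [ih, hg]
        simp [pvEmitPend, pvEmit, pvEmitRun]
      · rw [ih, hg]
        by_cases hk : (pvCapFirst w = k)
        · have hkf : k = false := by rw [← hk]; simp [hc]
          subst hkf
          simp [pvEmitPend, pvEmit, pvEmitRun]
        · have hkt : k = true := by
            cases k with
            | true => rfl
            | false => exact absurd (by simp [hc]) hk
          subst hkt
          simp [pvEmitPend, pvEmit, pvEmitRun]

theorem pvEmitPend_nil (runs : List (Bool × List String)) :
    pvEmitPend [] runs = pvEmit runs := by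
  rcases runs with _ | ⟨⟨k, run⟩, rest⟩
  · rfl
  · cases k with
    | true => simp [pvEmitPend, pvEmit, pvEmitRun]
    | false => simp [pvEmitPend]

theorem pvEmit_foldl (runs : List (Bool × List String)) (res : List (List String)) :
    runs.foldl (fun result kr =>
      if kr.1 then
        let seq := kr.2.filter (fun w => !(pvStopword w))
        if seq.isEmpty then result else result ++ [seq]
      else result) res = res ++ pvEmit runs := by
  induction runs generalizing res with
  | nil => simp [pvEmit]
  | cons kr rest ih =>
    rw [List.foldl_cons, ih]
    simp only [pvEmit, List.flatMap_cons, pvEmitRun]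
    rcases kr with ⟨k, run⟩
    cases k
    · simp
    · by_cases hp : (List.filter (fun w => !pvStopword w) run).isEmpty = true <;> simp [hp]

-- ===== VERDICT (by name: the statement is the Claim_ definition above) =====
theorem get_capitalised_word_sequences_spec : Claim_equal_get_capitalised_word_sequences := by
  intro sentences hDom
  clear hDom
  unfold Spec_get_capitalised_word_sequences
  unfold get_capitalised_word_sequences get_capitalised_word_sequences_alt
  induction sentences using List.reverseRecOn with
  | nil => rfl
  | append_singleton ss s ih =>
    rw [List.foldl_append, List.foldl_append, ← ih]
    simp only [List.foldl_cons, List.foldl_nil]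
    rw [pvALoop_foldl, pvALoop_emitPend, pvEmitPend_nil, pvEmit_foldl]
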